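-- pv_equiv track=rewrite | github.com/Afeks214/ML-Algo | src/ml_algo/cv_protocol.py | _fold_boundaries
-- ===== SOURCE A (Python) =====
-- from typing import Iterable, List, Sequence
--
-- def _fold_boundaries(n: int, k: int) -> List[tuple[int, int]]:
--     base, remainder = divmod(n, k)
--     sizes = [base + (1 if i < remainder else 0) for i in range(k)]
--     bounds: List[tuple[int, int]] = []
--     start = 0
--     for size in sizes:
--         end = start + size
--         bounds.append((start, end))
--         start = end
--     return bounds
-- ===== SOURCE B (Python) =====
-- def _fold_boundaries(n: int, k: int):
--     base, remainder = divmod(n, k)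
--     return [(i * base + min(i, remainder), (i + 1) * base + min(i + 1, remainder))
--             for i in range(k)]
-- ===== Notes on version B (the rewrite author's own statement) =====
-- stated objective: simpler
-- what changed: Replaced the sizes list and the running start accumulator with a single comprehension computing each fold's (start, end) by the closed form i*base + min(i, remainder).
import Mathlib
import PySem

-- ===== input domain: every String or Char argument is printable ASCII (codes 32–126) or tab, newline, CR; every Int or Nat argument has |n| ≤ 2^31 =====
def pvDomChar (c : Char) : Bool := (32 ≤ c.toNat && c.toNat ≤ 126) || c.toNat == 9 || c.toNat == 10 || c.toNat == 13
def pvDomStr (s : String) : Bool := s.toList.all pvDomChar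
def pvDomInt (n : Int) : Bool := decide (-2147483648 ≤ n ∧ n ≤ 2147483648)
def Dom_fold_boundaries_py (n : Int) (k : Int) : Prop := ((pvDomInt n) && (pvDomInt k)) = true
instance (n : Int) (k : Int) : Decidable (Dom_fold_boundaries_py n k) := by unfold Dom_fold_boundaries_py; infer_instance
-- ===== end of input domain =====

-- B replaces A's sizes list and running-start accumulator by a closed-form comprehension (objective: simpler).

-- ===== PORT A =====
-- the loop body 'end = start + size; bounds.append((start, end)); start = end'
def pvStepA (acc : List (Int × Int) × Int) (size : Int) : List (Int × Int) × Int :=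
  (acc.1 ++ [(acc.2, acc.2 + size)], acc.2 + size)

def fold_boundaries_py (n : Int) (k : Int) : List (Int × Int) :=
  match PySem.Int.divmod? n k with
  | none => []  -- unreachable under Pre_ (k ≠ 0)
  | some (base, remainder) =>
      let sizes := (PySem.List.pyRange 0 k 1).map (fun i => base + (if i < remainder then 1 else 0))
      (sizes.foldl pvStepA ([], 0)).1

-- ===== PORT B =====
def fold_boundaries_py_alt (n : Int) (k : Int) : List (Int × Int) :=
  match PySem.Int.divmod? n k with
  | none => []  -- unreachable under Pre_ (k ≠ 0)
  | some (base, remainder) =>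
      (PySem.List.pyRange 0 k 1).map (fun i =>
        (i * base + min i remainder, (i + 1) * base + min (i + 1) remainder))

-- ===== PRECONDITION & SPEC =====
-- Pre_ excludes only k = 0, on which A's divmod raises ZeroDivisionError.
def Pre_fold_boundaries_py (n : Int) (k : Int) : Prop := k ≠ 0
instance (n : Int) (k : Int) : Decidable (Pre_fold_boundaries_py n k) := by unfold Pre_fold_boundaries_py; infer_instance
def pvWitness_fold_boundaries_py : Int × Int := (7, 3)

def Spec_fold_boundaries_py (n : Int) (k : Int) (out : List (Int × Int)) : Prop := out = fold_boundaries_py_alt n k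
instance (n : Int) (k : Int) (out : List (Int × Int)) : Decidable (Spec_fold_boundaries_py n k out) := by unfold Spec_fold_boundaries_py; infer_instance

-- ===== CLAIM (what is proved, stated in full; the proofs are below) =====
def Claim_equal_fold_boundaries_py : Prop := ∀ (n : Int) (k : Int), Dom_fold_boundaries_py n k → Pre_fold_boundaries_py n k → Spec_fold_boundaries_py n k (fold_boundaries_py n k)

-- ===== LEMMAS AND PROOFS =====

-- the accumulator after the first m folds: the list is the closed-form prefix, start = m*base + min m r
theorem pvFoldInv (base r : Int) (hr : 0 ≤ r) (m : Nat) :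
    ((List.range m).map (fun j : Nat => base + (if (j : Int) < r then (1:Int) else 0))).foldl pvStepA ([], 0)
    = ((List.range m).map (fun j : Nat =>
        ((j : Int) * base + min (j : Int) r, ((j : Int) + 1) * base + min ((j : Int) + 1) r)),
       (m : Int) * base + min (m : Int) r) := by
  induction m with
  | zero => simp; omega
  | succ m ih =>
      rw [List.range_succ, List.map_append, List.map_append, List.foldl_append, ih]
      simp [pvStepA]
      have hb : ((m:Int) + 1) * base = (m:Int) * base + base := by ring
      rw [hb]
      generalize (m:Int) * base = c
      split_ifs <;> omega

-- ===== VERDICT (by name: the statement is the Claim_ definition above) =====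
theorem fold_boundaries_py_spec : Claim_equal_fold_boundaries_py := by
  intro n k _ hk
  have hk' : k ≠ 0 := hk
  unfold Spec_fold_boundaries_py fold_boundaries_py fold_boundaries_py_alt
  rcases h : PySem.Int.divmod? n k with _ | ⟨base, r⟩
  · rfl
  · by_cases hk0 : k ≤ 0
    · have hkr : (k - 0).toNat = 0 := by omega
      rw [PySem.List.pyRange_one, hkr]
      rfl
    · replace hk0 : 0 < k := by omega
      have hr : 0 ≤ r := by
        have hd : PySem.Int.divmod? n k = some (n.fdiv k, n.fmod k) := by
          simp [PySem.Int.divmod?, hk']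
        rw [hd] at h
        have hr' : r = n.fmod k := by injection h with h'; exact (congrArg Prod.snd h').symm
        rw [hr']
        exact Int.fmod_nonneg_of_pos n hk0
      rw [PySem.List.pyRange_one]
      simp only [Int.sub_zero, List.map_map]
      rw [show (Function.comp (fun i => base + (if i < r then (1:Int) else 0)) (fun j : Nat => (0:Int) + j))
            = (fun j : Nat => base + (if (j:Int) < r then (1:Int) else 0)) by funext j; simp]
      rw [pvFoldInv base r hr]
      apply List.map_congr_left
      intro j _
      simp
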